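-- pv_equiv track=rewrite | github.com/bendeez/hotel-management-system-backend | scraper/hotel_data/data_cleaner/hotel_data_cleaner_tool.py | modify_house_rules
-- ===== SOURCE A (Python) =====
-- def modify_house_rules(house_rules):
--     if isinstance(house_rules, dict):
--         for key, value in house_rules.copy().items():
--             if key == "Cards accepted at this property":
--                 house_rules["Cards accepted at this hotel"] = value
--                 del house_rules[key]
--             elif key == "Parties":
--                 house_rules["Groups"] = value
--                 del house_rules[key]
--             elif key == "No age restriction":
--                 house_rules["Age restriction"] = value
--                 del house_rules[key]
--         return house_rules
--
--     else:
--         return None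
-- ===== SOURCE B (Python) =====
-- RENAMES = {
--     "Cards accepted at this property": "Cards accepted at this hotel",
--     "Parties": "Groups",
--     "No age restriction": "Age restriction",
-- }
--
--
-- def modify_house_rules(house_rules):
--     if not isinstance(house_rules, dict):
--         return None
--     kept = {k: v for k, v in house_rules.items() if k not in RENAMES}
--     moved = {RENAMES[k]: v for k, v in house_rules.items() if k in RENAMES}
--     return {**kept, **moved}
-- ===== Notes on version B (the rewrite author's own statement) =====
-- stated objective: idiomatic
-- what changed: Replaces A's in-place mutate-while-iterating loop with its if/elif chain by a table-driven rebuild: a constant rename map and two dict comprehensions (unrenamed entries, renamed entries) merged with {**kept, **moved}, which yields the identical dict including insertion order.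
import Mathlib
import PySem

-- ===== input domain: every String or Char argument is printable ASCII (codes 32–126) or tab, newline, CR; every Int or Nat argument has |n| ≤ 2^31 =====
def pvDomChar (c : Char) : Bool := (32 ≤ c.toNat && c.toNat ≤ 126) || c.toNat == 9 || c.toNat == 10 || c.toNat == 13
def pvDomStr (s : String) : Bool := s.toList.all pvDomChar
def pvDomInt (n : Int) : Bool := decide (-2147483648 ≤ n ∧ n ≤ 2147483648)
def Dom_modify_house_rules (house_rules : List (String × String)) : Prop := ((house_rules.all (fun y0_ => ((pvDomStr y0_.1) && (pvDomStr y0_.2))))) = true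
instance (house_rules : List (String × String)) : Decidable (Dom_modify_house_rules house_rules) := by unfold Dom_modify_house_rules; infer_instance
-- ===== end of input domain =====

-- B rebuilds the dict from a constant rename table instead of A's mutate-while-iterating
-- if/elif loop; equivalence is about the RETURN value only (Python A mutates its argument
-- in place, Python B returns a fresh dict).

-- ===== PORT A =====
-- A iterates over a copy of the dict's items; for each of the three special keys it
-- inserts the renamed key (Python dict semantics: overwrite in place or append) and
-- deletes the old one.  The isinstance(dict) guard is always true on the typed input,
-- so the `return None` branch is unreachable and the port always returns `some _`.
def modify_house_rules (house_rules : List (String × String)) : Option (List (String × String)) :=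
  let d0 : PySem.Dict String String := PySem.Dict.ofList house_rules
  let d := d0.items.foldl (fun (d : PySem.Dict String String) kv =>
    if kv.1 == "Cards accepted at this property" then
      (d.insert "Cards accepted at this hotel" kv.2).erase kv.1
    else if kv.1 == "Parties" then
      (d.insert "Groups" kv.2).erase kv.1
    else if kv.1 == "No age restriction" then
      (d.insert "Age restriction" kv.2).erase kv.1
    else d) d0
  some d.items

-- ===== PORT B =====
-- the constant RENAMES table of Source B
def pvRenames : PySem.Dict String String :=
  PySem.Dict.ofList [("Cards accepted at this property", "Cards accepted at this hotel"),
                     ("Parties", "Groups"),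
                     ("No age restriction", "Age restriction")]

-- kept  = {k: v for k, v in house_rules.items() if k not in RENAMES}
-- moved = {RENAMES[k]: v for k, v in house_rules.items() if k in RENAMES}
--   (the guard `k in RENAMES` plus the lookup RENAMES[k] become one `match` on get?)
-- return {**kept, **moved}
def modify_house_rules_alt (house_rules : List (String × String)) : Option (List (String × String)) :=
  let items := (PySem.Dict.ofList house_rules).items
  let kept := items.foldl (fun (d : PySem.Dict String String) kv =>
      if pvRenames.contains kv.1 then d else d.insert kv.1 kv.2) PySem.Dict.empty
  let moved := items.foldl (fun (d : PySem.Dict String String) kv =>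
      match pvRenames.get? kv.1 with
      | some nk => d.insert nk kv.2
      | none => d) PySem.Dict.empty
  some (kept.update moved.items).items

-- ===== PRECONDITION & SPEC =====
def Spec_modify_house_rules (house_rules : List (String × String)) (out : Option (List (String × String))) : Prop := out = modify_house_rules_alt house_rules
instance (house_rules : List (String × String)) (out : Option (List (String × String))) : Decidable (Spec_modify_house_rules house_rules out) := by unfold Spec_modify_house_rules; infer_instance

-- ===== CLAIM (what is proved, stated in full; the proofs are below) =====
def Claim_equal_modify_house_rules : Prop := ∀ (house_rules : List (String × String)), Dom_modify_house_rules house_rules → Spec_modify_house_rules house_rules (modify_house_rules house_rules)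

-- ===== LEMMAS AND PROOFS =====

-- the rename table as a function (proof-side view of pvRenames)
def pvR (k : String) : Option String := pvRenames.get? k

lemma pvR_eq (k : String) : pvR k =
    (if k = "Cards accepted at this property" then some "Cards accepted at this hotel"
     else if k = "Parties" then some "Groups"
     else if k = "No age restriction" then some "Age restriction"
     else none) := by
  by_cases h1 : k = "Cards accepted at this property"
  · subst h1; decide
  by_cases h2 : k = "Parties"
  · subst h2; decide
  by_cases h3 : k = "No age restriction"
  · subst h3; decide
  have f1 : ("Cards accepted at this property" == k) = false :=
    beq_eq_false_iff_ne.mpr (Ne.symm h1)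
  have f2 : ("Parties" == k) = false := beq_eq_false_iff_ne.mpr (Ne.symm h2)
  have f3 : ("No age restriction" == k) = false := beq_eq_false_iff_ne.mpr (Ne.symm h3)
  simp [pvR, pvRenames, PySem.Dict.ofList, PySem.Dict.update, PySem.Dict.empty,
    PySem.Dict.insert, PySem.Dict.contains, PySem.Dict.get?, List.find?,
    f1, f2, f3, h1, h2, h3]

-- a rename target is never a rename source
lemma pvR_target {k nk : String} (h : pvR k = some nk) : pvR nk = none := by
  rw [pvR_eq] at h
  split_ifs at h with a b c
  · obtain rfl := Option.some.inj h; decide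
  · obtain rfl := Option.some.inj h; decide
  · obtain rfl := Option.some.inj h; decide

-- a source is distinct from its target
lemma pvR_ne {k nk : String} (h : pvR k = some nk) : nk ≠ k := by
  rw [pvR_eq] at h
  split_ifs at h with a b c
  · subst a; obtain rfl := Option.some.inj h; decide
  · subst b; obtain rfl := Option.some.inj h; decide
  · subst c; obtain rfl := Option.some.inj h; decide

-- the rename table is injective
lemma pvR_inj {k₁ k₂ n : String} (h₁ : pvR k₁ = some n) (h₂ : pvR k₂ = some n) : k₁ = k₂ := by
  rw [pvR_eq] at h₁ h₂
  split_ifs at h₁ h₂ <;> simp_all <;>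
    exact absurd (h₁.trans h₂.symm) (by decide)

-- A's loop body, named
def pvStep (d : PySem.Dict String String) (kv : String × String) : PySem.Dict String String :=
  if kv.1 == "Cards accepted at this property" then
    (d.insert "Cards accepted at this hotel" kv.2).erase kv.1
  else if kv.1 == "Parties" then
    (d.insert "Groups" kv.2).erase kv.1
  else if kv.1 == "No age restriction" then
    (d.insert "Age restriction" kv.2).erase kv.1
  else d

lemma pvStep_some {d : PySem.Dict String String} {kv : String × String} {nk : String}
    (h : pvR kv.1 = some nk) : pvStep d kv = (d.insert nk kv.2).erase kv.1 := by
  rw [pvR_eq] at h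
  split_ifs at h with a b c
  · obtain rfl := Option.some.inj h; simp [pvStep, a]
  · obtain rfl := Option.some.inj h; simp [pvStep, b]
  · obtain rfl := Option.some.inj h; simp [pvStep, c]

lemma pvStep_none {d : PySem.Dict String String} {kv : String × String}
    (h : pvR kv.1 = none) : pvStep d kv = d := by
  rw [pvR_eq] at h
  split_ifs at h with a b c
  simp [pvStep, a, b, c]

-- erasing a key does not change membership of a different key
lemma contains_erase_of_ne (d : PySem.Dict String String) (k nk : String) (h : nk ≠ k) :
    (d.erase k).contains nk = d.contains nk := by
  obtain ⟨items⟩ := d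
  simp only [PySem.Dict.contains, PySem.Dict.erase]
  induction items with
  | nil => rfl
  | cons a l ih =>
      by_cases ha : a.1 = k
      · have hb : (a.1 == nk) = false :=
          beq_eq_false_iff_ne.mpr (fun he => h (he.symm.trans ha))
        simp [ha, ih]
        exact fun he => absurd he.symm h
      · simp [ha, ih]

-- erase commutes with an insert at a different key
lemma insert_erase_comm (d : PySem.Dict String String) (k nk : String) (v : String)
    (h : nk ≠ k) : (d.insert nk v).erase k = (d.erase k).insert nk v := by
  apply PySem.Dict.ext
  have hE : ∀ (x : PySem.Dict String String),
      (x.erase k).items = x.items.filter (fun p => !(p.1 == k)) := fun x => rfl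
  have hΔ : ((d.erase k).insert nk v).items = if d.contains nk = true
      then List.map (fun p => if (p.1 == nk) = true then (nk, v) else p) (d.erase k).items
      else (d.erase k).items ++ [(nk, v)] := by
    rw [PySem.Dict.items_insert, contains_erase_of_ne d k nk h]
  rw [hΔ, hE (d.insert nk v), hE d, PySem.Dict.items_insert]
  by_cases hc : d.contains nk = true
  · rw [if_pos hc, if_pos hc, List.filter_map]
    exact congrArg _ (List.filter_congr fun p _ => by
      by_cases hp : p.1 = nk <;> simp [hp])
  · rw [if_neg hc, if_neg hc, List.filter_append]
    simp [h]

def pvEraseMany (d : PySem.Dict String String) (ks : List String) : PySem.Dict String String :=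
  ks.foldl (fun d k => d.erase k) d

lemma pvEraseMany_insert_comm (ks : List String) (d : PySem.Dict String String)
    (nk : String) (v : String) (h : ∀ x ∈ ks, nk ≠ x) :
    pvEraseMany (d.insert nk v) ks = (pvEraseMany d ks).insert nk v := by
  induction ks generalizing d with
  | nil => rfl
  | cons x ks ih =>
      simp only [pvEraseMany, List.foldl_cons] at *
      rw [insert_erase_comm d x nk v (h x (by simp)), ih _ (fun y hy => h y (by simp [hy]))]

lemma items_pvEraseMany (d : PySem.Dict String String) (ks : List String) :
    (pvEraseMany d ks).items = d.items.filter (fun p => !ks.contains p.1) := by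
  induction ks generalizing d with
  | nil => simp [pvEraseMany]
  | cons x ks ih =>
      simp only [pvEraseMany, List.foldl_cons] at *
      rw [ih]
      simp [PySem.Dict.erase, List.filter_filter]
      apply List.filter_congr
      intro p _
      by_cases h1 : p.1 = x <;> by_cases h2 : p.1 ∈ ks <;> simp [h1, h2]

-- the source keys / the moved pairs of a list of items
def pvSrcs (s : List (String × String)) : List String :=
  s.filterMap (fun p => if (pvR p.1).isSome then some p.1 else none)

def pvMs (s : List (String × String)) : List (String × String) :=
  s.filterMap (fun p => (pvR p.1).map (fun nk => (nk, p.2)))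

def pvInsFold (d : PySem.Dict String String) (qs : List (String × String)) : PySem.Dict String String :=
  qs.foldl (fun d q => d.insert q.1 q.2) d

lemma mem_pvSrcs {x : String} {s : List (String × String)} (h : x ∈ pvSrcs s) :
    (pvR x).isSome := by
  simp only [pvSrcs, List.mem_filterMap] at h
  obtain ⟨p, _, hp⟩ := h
  by_cases hs : (pvR p.1).isSome <;> simp [hs] at hp
  subst hp; exact hs

-- the main characterisation of A's loop: all erasures may be done first,
-- with the renamed pairs inserted afterwards in traversal order
lemma foldA_eq (s : List (String × String)) (d : PySem.Dict String String) :
    s.foldl pvStep d = pvInsFold (pvEraseMany d (pvSrcs s)) (pvMs s) := by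
  induction s generalizing d with
  | nil => rfl
  | cons p s ih =>
      rw [List.foldl_cons]
      cases hr : pvR p.1 with
      | none => rw [pvStep_none hr, ih]; simp [pvSrcs, pvMs, hr]
      | some nk =>
          rw [pvStep_some hr, insert_erase_comm d p.1 nk p.2 (pvR_ne hr), ih]
          have hsw : pvEraseMany ((d.erase p.1).insert nk p.2) (pvSrcs s)
              = (pvEraseMany (d.erase p.1) (pvSrcs s)).insert nk p.2 := by
            apply pvEraseMany_insert_comm
            intro x hx hne
            subst hne
            have := mem_pvSrcs hx
            rw [pvR_target hr] at this
            simp at this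
          rw [hsw]
          simp only [pvSrcs, pvMs, List.filterMap_cons, hr, Option.isSome_some, if_pos,
            Option.map_some]
          rfl

-- B's moved-comprehension is the insert-fold of the moved pairs
lemma foldB_moved (s : List (String × String)) (d : PySem.Dict String String) :
    s.foldl (fun (d : PySem.Dict String String) (kv : String × String) =>
        match pvRenames.get? kv.1 with
        | some nk => d.insert nk kv.2
        | none => d) d = pvInsFold d (pvMs s) := by
  induction s generalizing d with
  | nil => rfl
  | cons p s ih =>
      rw [List.foldl_cons]
      cases hr : pvR p.1 with
      | none =>
          have hred : (match pvRenames.get? p.1 with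
              | some nk => d.insert nk p.2
              | none => d) = d := by rw [show pvRenames.get? p.1 = pvR p.1 from rfl, hr]
          rw [hred, ih]
          simp [pvMs, hr]
      | some nk =>
          have hred : (match pvRenames.get? p.1 with
              | some nk => d.insert nk p.2
              | none => d) = d.insert nk p.2 := by
            rw [show pvRenames.get? p.1 = pvR p.1 from rfl, hr]
          rw [hred, ih]
          simp only [pvMs, List.filterMap_cons, hr, Option.map_some]
          rfl

lemma mem_fst_pvMs {x : String} {s : List (String × String)}
    (h : x ∈ (pvMs s).map Prod.fst) : ∃ q ∈ s, pvR q.1 = some x := by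
  simp only [pvMs, List.map_filterMap, List.mem_filterMap] at h
  obtain ⟨q, hq, hqx⟩ := h
  cases hr : pvR q.1 with
  | none => rw [hr] at hqx; simp at hqx
  | some nk =>
      rw [hr] at hqx
      simp at hqx
      exact ⟨q, hq, by rw [hr, hqx]⟩

lemma nodup_fst_pvMs {s : List (String × String)} (h : (s.map Prod.fst).Nodup) :
    ((pvMs s).map Prod.fst).Nodup := by
  induction s with
  | nil => simp [pvMs]
  | cons p s ih =>
      simp only [List.map_cons, List.nodup_cons] at h
      cases hr : pvR p.1 with
      | none => simpa [pvMs, hr] using ih h.2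
      | some nk =>
          simp only [pvMs, List.filterMap_cons, hr, Option.map_some, List.map_cons,
            List.nodup_cons]
          refine ⟨?_, by simpa [pvMs] using ih h.2⟩
          intro hmem
          obtain ⟨q, hq, hqr⟩ := mem_fst_pvMs (by simpa [pvMs] using hmem)
          exact h.1 (pvR_inj hr hqr ▸ List.mem_map_of_mem hq)

-- ===== VERDICT (by name: the statement is the Claim_ definition above) =====
theorem modify_house_rules_spec : Claim_equal_modify_house_rules := by
  intro hr _
  unfold Spec_modify_house_rules modify_house_rules modify_house_rules_alt
  set d0 := PySem.Dict.ofList hr with hd0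
  set L := d0.items with hL
  have hnd : (L.map Prod.fst).Nodup := PySem.Dict.nodup_keys_ofList hr
  have hA : L.foldl (fun (d : PySem.Dict String String) (kv : String × String) =>
      if kv.1 == "Cards accepted at this property" then
        (d.insert "Cards accepted at this hotel" kv.2).erase kv.1
      else if kv.1 == "Parties" then
        (d.insert "Groups" kv.2).erase kv.1
      else if kv.1 == "No age restriction" then
        (d.insert "Age restriction" kv.2).erase kv.1
      else d) d0 = pvInsFold (pvEraseMany d0 (pvSrcs L)) (pvMs L) := foldA_eq L d0
  have hkept : L.foldl (fun (d : PySem.Dict String String) (kv : String × String) =>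
      if pvRenames.contains kv.1 then d else d.insert kv.1 kv.2) PySem.Dict.empty
      = pvEraseMany d0 (pvSrcs L) := by
    have hfun : (fun (d : PySem.Dict String String) (kv : String × String) =>
        if pvRenames.contains kv.1 then d else d.insert kv.1 kv.2)
        = (fun (d : PySem.Dict String String) (kv : String × String) =>
            if !pvRenames.contains kv.1 then d.insert kv.1 kv.2 else d) := by
      funext d kv; cases hc : pvRenames.contains kv.1 <;> simp
    rw [hfun, ← List.foldl_filter]
    apply PySem.Dict.ext
    have hsub : ((L.filter (fun kv => !pvRenames.contains kv.1)).map Prod.fst).Nodup :=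
      List.Nodup.sublist (List.filter_sublist.map Prod.fst) hnd
    rw [PySem.Dict.items_foldl_insert_fresh _ Prod.fst Prod.snd PySem.Dict.empty
      (fun a _ => rfl) hsub, items_pvEraseMany]
    simp only [PySem.Dict.empty, List.nil_append]
    rw [show (List.map (fun (a : String × String) => (Prod.fst a, Prod.snd a))
        (L.filter (fun kv => !pvRenames.contains kv.1)))
        = L.filter (fun kv => !pvRenames.contains kv.1) by simp]
    apply List.filter_congr
    intro p hp
    have hcc : (pvSrcs L).contains p.1 = pvRenames.contains p.1 := by
      rw [PySem.Dict.contains_eq_isSome_get? pvRenames p.1]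
      show (pvSrcs L).contains p.1 = (pvR p.1).isSome
      cases hm : (pvSrcs L).contains p.1 with
      | true =>
          have hmem : p.1 ∈ pvSrcs L := by simpa using hm
          exact (mem_pvSrcs hmem).symm
      | false =>
          cases hs : (pvR p.1).isSome with
          | false => rfl
          | true =>
              exfalso
              have hmem : p.1 ∈ pvSrcs L := by
                simp only [pvSrcs, List.mem_filterMap]
                exact ⟨p, hp, by simp [hs]⟩
              simp [hmem] at hm
    rw [hcc]
  have hmoved : L.foldl (fun (d : PySem.Dict String String) (kv : String × String) =>
      match pvRenames.get? kv.1 with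
      | some nk => d.insert nk kv.2
      | none => d) PySem.Dict.empty = pvInsFold PySem.Dict.empty (pvMs L) :=
    foldB_moved L PySem.Dict.empty
  have hmoveditems : (pvInsFold PySem.Dict.empty (pvMs L)).items = pvMs L := by
    have hfresh := PySem.Dict.items_foldl_insert_fresh (pvMs L) Prod.fst Prod.snd
      PySem.Dict.empty (fun a _ => rfl) (nodup_fst_pvMs hnd)
    simpa [pvInsFold, PySem.Dict.empty] using hfresh
  simp only [← hL]
  rw [hA, hkept, hmoved, hmoveditems]
  rfl
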